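-- pv_equiv track=rewrite | github.com/mayurandhare13/coding-pattern | 17. backtracking/bt-8.py | numTilesPossibilities2
-- ===== SOURCE A (Python) =====
-- def numTilesPossibilities2(tiles):
--     subset = ['']
--     for ch in tiles:
--         _len = len(subset)
--         for i in range(_len):
--             _set = list(subset[i])
--             _set.append(ch)
--             subset.append(''.join(_set))
--
--     return subset
-- ===== SOURCE B (Python) =====
-- def numTilesPossibilities2(tiles):
--     n = len(tiles)
--     res = []
--     for mask in range(1 << n):
--         res.append(''.join(tiles[j] for j in range(n) if (mask >> j) & 1))
--     return res
-- ===== Notes on version B (the rewrite author's own statement) =====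
-- stated objective: alternative
-- what changed: Replaces A in-place list-doubling (inner loop re-reading and appending to the growing subset list) with direct bitmask enumeration: for each mask in range(2**n) the subset string is built by joining tiles[j] for set bits j (bit 0 = first char), reproducing A output order exactly.
import Mathlib
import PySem

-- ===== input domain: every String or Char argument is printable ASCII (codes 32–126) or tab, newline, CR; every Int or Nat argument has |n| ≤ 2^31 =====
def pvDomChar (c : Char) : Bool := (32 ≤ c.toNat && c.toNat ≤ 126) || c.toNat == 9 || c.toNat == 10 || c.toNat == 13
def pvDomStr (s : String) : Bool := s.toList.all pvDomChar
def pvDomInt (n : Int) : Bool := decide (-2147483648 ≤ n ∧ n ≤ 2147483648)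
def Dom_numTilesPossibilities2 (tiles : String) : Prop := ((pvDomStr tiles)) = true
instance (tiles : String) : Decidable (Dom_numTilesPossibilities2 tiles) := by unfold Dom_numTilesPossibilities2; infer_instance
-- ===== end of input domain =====

-- ===== PORT A =====
-- B (bitmask enumeration) replaces A's in-place list doubling; same output list, order and all; objective: idiomatic/alternative.
def numTilesPossibilities2 (tiles : String) : List String :=
  tiles.toList.foldl
    (fun subset ch =>
      (List.range subset.length).foldl
        (fun acc i => acc ++ [String.mk ((acc.getD i "").toList ++ [ch])])
        subset)
    [""]

-- ===== PORT B =====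
def numTilesPossibilities2_alt (tiles : String) : List String :=
  let n := tiles.toList.length
  (List.range (2 ^ n)).foldl
    (fun res mask =>
      res ++ [String.mk (((List.range n).filter (fun j => (mask >>> j) &&& 1 = 1)).map
        (fun j => tiles.toList.getD j ' '))])
    []

-- ===== PRECONDITION & SPEC =====
def Spec_numTilesPossibilities2 (tiles : String) (out : List String) : Prop := out = numTilesPossibilities2_alt tiles
instance (tiles : String) (out : List String) : Decidable (Spec_numTilesPossibilities2 tiles out) := by unfold Spec_numTilesPossibilities2; infer_instance

-- ===== CLAIM (what is proved, stated in full; the proofs are below) =====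
def Claim_equal_numTilesPossibilities2 : Prop := ∀ (tiles : String), Dom_numTilesPossibilities2 tiles → Spec_numTilesPossibilities2 tiles (numTilesPossibilities2 tiles)

-- ===== LEMMAS AND PROOFS =====

-- the subset string selected by a bitmask
def pvMaskStr (l : List Char) (mask : Nat) : String :=
  String.mk (((List.range l.length).filter (fun j => (mask >>> j) &&& 1 = 1)).map
    (fun j => l.getD j ' '))

-- A's per-character step, after the inner loop is summarised
def pvStepA (s : List String) (c : Char) : List String :=
  s ++ s.map (fun x => String.mk (x.toList ++ [c]))

theorem pv_foldl_append_map {α : Type} (f : α → String) :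
    ∀ (xs : List α) (acc : List String),
      xs.foldl (fun r i => r ++ [f i]) acc = acc ++ xs.map f := by
  intro xs
  induction xs with
  | nil => simp
  | cons x xs ih => intro acc; simp [List.foldl_cons, ih]

theorem pv_bit_iff (m j : Nat) : ((m >>> j) &&& 1 = 1) ↔ m.testBit j := by
  simp [Nat.testBit]

theorem pv_inner (c : Char) :
    ∀ (k : Nat) (s : List String), k ≤ s.length →
      (List.range k).foldl
        (fun acc i => acc ++ [String.mk ((acc.getD i "").toList ++ [c])]) s
      = s ++ (s.take k).map (fun x => String.mk (x.toList ++ [c])) := by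
  intro k
  induction k with
  | zero => intro s _; simp
  | succ k ih =>
      intro s hk
      have hk' : k < s.length := by omega
      rw [List.range_succ, List.foldl_append, ih s (by omega)]
      have hget : (s ++ (s.take k).map (fun x => String.mk (x.toList ++ [c]))).getD k ""
          = s[k] := by
        rw [List.getD_append _ _ _ _ hk']
        simp [List.getD, List.getElem?_eq_getElem hk']
      simp only [List.foldl_cons, List.foldl_nil, hget]
      have htake : s.take (k + 1) = s.take k ++ [s[k]] := by
        rw [List.take_add_one, List.getElem?_eq_getElem hk']; rfl
      rw [htake, List.map_append, List.append_assoc]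
      rfl

theorem pv_stepA (s : List String) (c : Char) :
    (List.range s.length).foldl
      (fun acc i => acc ++ [String.mk ((acc.getD i "").toList ++ [c])]) s
    = pvStepA s c := by
  rw [pv_inner c s.length s le_rfl, List.take_length]; rfl

theorem pv_toList_mk (l : List Char) : (String.mk l).toList = l :=
  Eq.symm (String.ofList_eq.mp rfl)

theorem pv_maskStr_low (l : List Char) (c : Char) (mask : Nat) (h : mask < 2 ^ l.length) :
    pvMaskStr (l ++ [c]) mask = pvMaskStr l mask := by
  have hbit : mask.testBit l.length = false := Nat.testBit_lt_two_pow h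
  unfold pvMaskStr
  rw [List.length_append, List.length_cons, List.length_nil]
  rw [List.range_succ, List.filter_append]
  have : List.filter (fun j => decide ((mask >>> j) &&& 1 = 1)) [l.length] = [] := by
    simp [List.filter, hbit]
  rw [this, List.append_nil]
  congr 1
  apply List.map_congr_left
  intro j hj
  have hjn : j < l.length := List.mem_range.mp (List.mem_filter.mp hj).1
  rw [List.getD_append _ _ _ _ hjn]

theorem pv_maskStr_high (l : List Char) (c : Char) (mask : Nat) (h : mask < 2 ^ l.length) :
    pvMaskStr (l ++ [c]) (2 ^ l.length + mask)
      = String.mk ((pvMaskStr l mask).toList ++ [c]) := by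
  unfold pvMaskStr
  rw [List.length_append, List.length_cons, List.length_nil]
  rw [List.range_succ, List.filter_append]
  have hbitn : (2 ^ l.length + mask).testBit l.length = true := by
    rw [Nat.testBit_two_pow_add_eq, Nat.testBit_lt_two_pow h]; rfl
  have hkeep : List.filter (fun j => decide (((2 ^ l.length + mask) >>> j) &&& 1 = 1))
      [l.length] = [l.length] := by
    simp [List.filter, hbitn]
  have hlow : List.filter (fun j => decide (((2 ^ l.length + mask) >>> j) &&& 1 = 1))
      (List.range l.length)
      = List.filter (fun j => decide ((mask >>> j) &&& 1 = 1)) (List.range l.length) := by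
    apply List.filter_congr
    intro j hj
    have hjn : j < l.length := List.mem_range.mp hj
    simp only [decide_eq_decide, pv_bit_iff]
    rw [Nat.testBit_two_pow_add_gt hjn]
  rw [hkeep, hlow, List.map_append]
  have h1 : List.map (fun j => (l ++ [c]).getD j ' ')
      (List.filter (fun j => decide ((mask >>> j) &&& 1 = 1)) (List.range l.length))
      = List.map (fun j => l.getD j ' ')
        (List.filter (fun j => decide ((mask >>> j) &&& 1 = 1)) (List.range l.length)) := by
    apply List.map_congr_left
    intro j hj
    have hjn : j < l.length := List.mem_range.mp (List.mem_filter.mp hj).1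
    rw [List.getD_append _ _ _ _ hjn]
  have h2 : List.map (fun j => (l ++ [c]).getD j ' ') [l.length] = [c] := by
    simp [List.getD, List.getElem?_append_right (le_refl l.length)]
  rw [h1, h2, pv_toList_mk]

theorem pv_main : ∀ (l : List Char),
    l.foldl
      (fun subset ch =>
        (List.range subset.length).foldl
          (fun acc i => acc ++ [String.mk ((acc.getD i "").toList ++ [ch])]) subset)
      [""]
    = (List.range (2 ^ l.length)).map (pvMaskStr l) := by
  intro l
  induction l using List.reverseRecOn with
  | nil =>
      simp only [List.foldl_nil, List.length_nil, pow_zero, List.range_one, List.map_cons,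
        List.map_nil]
      rfl
  | append_singleton l c ih =>
      rw [List.foldl_append, List.foldl_cons, List.foldl_nil, ih, pv_stepA]
      have hlen : (l ++ [c]).length = l.length + 1 := by simp
      rw [hlen, pow_succ, mul_two, List.range_add, List.map_append, List.map_map]
      unfold pvStepA
      congr 1
      · apply List.map_congr_left
        intro m hm
        exact (pv_maskStr_low l c m (List.mem_range.mp hm)).symm
      · rw [List.map_map]
        apply List.map_congr_left
        intro m hm
        exact (pv_maskStr_high l c m (List.mem_range.mp hm)).symm

-- ===== VERDICT (by name: the statement is the Claim_ definition above) =====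
theorem numTilesPossibilities2_spec : Claim_equal_numTilesPossibilities2 := by
  intro tiles _
  show numTilesPossibilities2 tiles = numTilesPossibilities2_alt tiles
  unfold numTilesPossibilities2 numTilesPossibilities2_alt
  rw [pv_main, pv_foldl_append_map, List.nil_append]
  rfl
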